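-- pv_equiv track=rewrite | github.com/apparentorder/aoc | 2019/aoc4.py | check_adjacent_p2
-- ===== SOURCE A (Python) =====
-- def check_adjacent_p2(pw):
-- 	s = str(pw)
--
-- 	prev = "x"
-- 	consecutive = 0
-- 	for digit in str(pw):
-- 		if digit == prev:
-- 			consecutive += 1
-- 		else:
-- 			if consecutive == 2:
-- 				# consecutive row breaks, but
-- 				# we've seen exactly two matching
-- 				# digits
-- 				return True
-- 			else:
-- 				# consecutive row breaks, restarting
-- 				# counting at 1
-- 				consecutive = 1
--
-- 		prev = digit
--
-- 	if consecutive == 2: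
-- 		# we need to check again here, in case those
-- 		# were the last two digits
-- 		return True
--
-- 	return False
-- ===== SOURCE B (Python) =====
-- def check_adjacent_p2(pw):
--     # build the maximal-run lengths of str(pw) first, then test for a run of exactly 2
--     runs = []
--     s = str(pw)
--     while s:
--         n = 1
--         while n < len(s) and s[n] == s[0]:
--             n += 1
--         runs.append(n)
--         s = s[n:]
--     return any(r == 2 for r in runs)
-- ===== Notes on version B (the rewrite author's own statement) =====
-- stated objective: alternative
-- what changed: B first splits str(pw) into maximal runs of equal characters and then checks whether any run has length exactly 2, instead of A's one-pass prev/consecutive state machine with early returns.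
import Mathlib
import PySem

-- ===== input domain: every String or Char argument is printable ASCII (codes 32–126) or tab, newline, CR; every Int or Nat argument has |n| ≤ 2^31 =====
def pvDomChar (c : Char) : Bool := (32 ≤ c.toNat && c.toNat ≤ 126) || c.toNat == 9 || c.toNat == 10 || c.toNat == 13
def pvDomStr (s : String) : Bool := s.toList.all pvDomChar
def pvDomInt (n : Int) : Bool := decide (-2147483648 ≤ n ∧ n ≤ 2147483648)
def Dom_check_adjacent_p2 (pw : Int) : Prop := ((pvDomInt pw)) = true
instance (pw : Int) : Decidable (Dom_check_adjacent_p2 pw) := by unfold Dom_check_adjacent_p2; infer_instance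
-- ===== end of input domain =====

-- B replaces A's prev/consecutive state machine (with early returns) by first splitting str(pw)
-- into maximal equal-character runs and checking for a run of length exactly 2 (alternative, same cost).


-- ===== PORT A =====
-- A's for-loop with early returns, as structural recursion over the digit characters
-- with state (prev, consecutive); the final 'consecutive == 2' check is the [] case.
def pvLoopA : Char → Int → List Char → Bool
  | _, c, [] => c == 2
  | p, c, d :: rest =>
    if d == p then pvLoopA d (c + 1) rest
    else if c == 2 then true
    else pvLoopA d 1 rest

def check_adjacent_p2 (pw : Int) : Bool :=
  pvLoopA 'x' 0 (PySem.Int.toStr pw).toList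

-- ===== PORT B =====
-- Source B's outer while: peel one maximal run (inner scan = takeWhile, s = s[n:] = dropWhile)
-- collecting the run lengths.
def pvRunsB : List Char → List Nat
  | [] => []
  | a :: rest =>
    (1 + (rest.takeWhile (· == a)).length) :: pvRunsB (rest.dropWhile (· == a))
termination_by l => l.length
decreasing_by
  simpa [Nat.lt_succ_iff] using List.length_dropWhile_le (· == a) rest

def check_adjacent_p2_alt (pw : Int) : Bool :=
  (pvRunsB (PySem.Int.toStr pw).toList).any (· == 2)

-- ===== PRECONDITION & SPEC =====
def Spec_check_adjacent_p2 (pw : Int) (out : Bool) : Prop := out = check_adjacent_p2_alt pw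
instance (pw : Int) (out : Bool) : Decidable (Spec_check_adjacent_p2 pw out) := by unfold Spec_check_adjacent_p2; infer_instance

-- ===== CLAIM (what is proved, stated in full; the proofs are below) =====
def Claim_equal_check_adjacent_p2 : Prop := ∀ (pw : Int), Dom_check_adjacent_p2 pw → Spec_check_adjacent_p2 pw (check_adjacent_p2 pw)

-- ===== LEMMAS AND PROOFS =====
theorem pvRunsB_cons (a : Char) (rest : List Char) :
    pvRunsB (a :: rest) =
      (1 + (rest.takeWhile (· == a)).length) :: pvRunsB (rest.dropWhile (· == a)) := by
  rw [pvRunsB]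

-- the Int '== 2' test on 1 + run-length agrees with the Nat one
theorem pvBeqCast (k : Nat) : ((1 + (k : Int)) == 2) = ((1 + k) == 2) := by
  by_cases h : k = 1
  · simp [h]
  · have h1 : ¬ ((1 : Int) + (k : Int) = 2) := by omega
    have h2 : ¬ (1 + k = 2) := by omega
    simp [h1, h2]

-- loop invariant: A's state machine with pending-run count c on prev p answers
-- "the pending run closes at length 2, or some maximal run of the rest has length exactly 2"
theorem pvLoopA_eq_aux (n : Nat) : ∀ (l : List Char), l.length ≤ n → ∀ (p : Char) (c : Int),
    pvLoopA p c l =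
      ((c + ((l.takeWhile (· == p)).length : Int) == 2)
        || (pvRunsB (l.dropWhile (· == p))).any (· == 2)) := by
  induction n with
  | zero =>
    intro l hl
    have : l = [] := List.length_eq_zero_iff.mp (Nat.le_zero.mp hl)
    subst this
    intro p c; simp [pvLoopA, pvRunsB]
  | succ n ih =>
    intro l hl
    cases l with
    | nil => intro p c; simp [pvLoopA, pvRunsB]
    | cons d rest =>
      have hrest : rest.length ≤ n := by simpa using hl
      intro p c
      by_cases h : d = p
      · subst h
        rw [pvLoopA]
        simp only [BEq.rfl, if_true, List.takeWhile_cons, List.dropWhile_cons]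
        rw [ih rest hrest d (c + 1)]
        congr 2
        simp only [List.length_cons]
        push_cast
        ring
      · have hb : (d == p) = false := by simp [h]
        rw [pvLoopA]
        simp only [hb, Bool.false_eq_true, if_false, List.takeWhile_cons, List.dropWhile_cons,
          List.length_nil, Nat.cast_zero, add_zero]
        by_cases h2 : c = 2
        · simp [h2]
        · have hc : (c == 2) = false := by simp [h2]
          simp only [hc, Bool.false_eq_true, if_false, Bool.false_or]
          rw [ih rest hrest d 1, pvRunsB_cons]
          simp only [List.any_cons, pvBeqCast]

theorem pvLoopA_eq (l : List Char) (p : Char) (c : Int) :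
    pvLoopA p c l =
      ((c + ((l.takeWhile (· == p)).length : Int) == 2)
        || (pvRunsB (l.dropWhile (· == p))).any (· == 2)) :=
  pvLoopA_eq_aux l.length l (le_refl _) p c

-- ===== VERDICT (by name: the statement is the Claim_ definition above) =====
theorem check_adjacent_p2_spec : Claim_equal_check_adjacent_p2 := by
  intro pw _
  unfold Spec_check_adjacent_p2 check_adjacent_p2 check_adjacent_p2_alt
  cases hl : (PySem.Int.toStr pw).toList with
  | nil => simp [pvLoopA, pvRunsB]
  | cons d rest =>
    rw [pvLoopA]
    -- whether or not d == 'x', the loop proceeds as pvLoopA d 1 rest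
    have key : pvLoopA d 1 rest = (pvRunsB (d :: rest)).any (· == 2) := by
      rw [pvLoopA_eq rest d 1, pvRunsB_cons]
      simp only [List.any_cons, pvBeqCast]
    by_cases h : d = 'x'
    · subst h
      rw [if_pos (by simp)]
      simpa using key
    · rw [if_neg (by simp [h]), if_neg (by decide)]
      exact key
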